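-- pv_equiv track=rewrite | github.com/R4z0rX/AdventJS-2024 | Python/Reto#17.py | detect_bombs
-- ===== SOURCE A (Python) =====
-- def detect_bombs(grid: list[list[bool]]) -> list[list[int]]:
--     rows, cols = len(grid), len(grid[0])
--     directions = [
--         (-1, -1), (-1, 0), (-1, 1),
--         (0, -1),          (0, 1),
--         (1, -1), (1, 0), (1, 1)
--     ]
--
--     def count_adjacent_bombs(r, c):
--         count = 0
--         for dr, dc in directions:
--             nr, nc = r + dr, c + dc
--
--             if 0 <= nr < rows and 0 <= nc < cols and grid[nr][nc]:
--                 count += 1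
--         return count
--
--     result = [[0] * cols for _ in range(rows)]
--
--     for r in range(rows):
--         for c in range(cols):
--             result[r][c] = count_adjacent_bombs(r, c)
--
--     return result
-- ===== SOURCE B (Python) =====
-- def detect_bombs(grid: list[list[bool]]) -> list[list[int]]:
--     # Sliding 3x3-window sums over row triples instead of an 8-direction scan per cell.
--     rows, cols = len(grid), len(grid[0])
--     zero = [0] * cols
--     int_rows = [[1 if v else 0 for v in row[:cols]] for row in grid]
--     result = []
--     for r in range(rows):
--         up = int_rows[r - 1] if r > 0 else zero
--         mid = int_rows[r]
--         down = int_rows[r + 1] if r + 1 < rows else zero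
--         col = [up[c] + mid[c] + down[c] for c in range(cols)]
--         out_row = []
--         for c in range(cols):
--             left = col[c - 1] if c > 0 else 0
--             right = col[c + 1] if c + 1 < cols else 0
--             out_row.append(left + col[c] + right - mid[c])
--         result.append(out_row)
--     return result
-- ===== Notes on version B (the rewrite author's own statement) =====
-- stated objective: faster
-- what changed: Replaces the per-cell 8-direction bounds-checked scan with row-triple column sums plus a sliding 3-wide window (3x3 box sum minus the center), removing the inner directions loop and all per-neighbor bounds checks.
import Mathlib
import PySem

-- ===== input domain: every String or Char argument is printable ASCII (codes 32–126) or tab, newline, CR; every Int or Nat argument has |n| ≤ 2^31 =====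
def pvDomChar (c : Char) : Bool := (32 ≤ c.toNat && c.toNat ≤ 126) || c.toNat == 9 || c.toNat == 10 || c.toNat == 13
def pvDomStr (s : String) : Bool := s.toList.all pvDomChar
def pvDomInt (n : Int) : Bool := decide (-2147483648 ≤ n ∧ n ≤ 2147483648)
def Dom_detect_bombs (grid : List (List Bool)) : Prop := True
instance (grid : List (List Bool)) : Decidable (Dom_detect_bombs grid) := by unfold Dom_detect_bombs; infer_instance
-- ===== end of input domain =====

-- B replaces the per-cell 8-direction scan by row-triple column sums and a sliding
-- 3-wide window (3x3 box sum minus the center); measurably faster by a constant factor.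

-- ===== PORT A =====
-- the literal directions list of A
def pvDirections : List (Int × Int) :=
  [(-1, -1), (-1, 0), (-1, 1), (0, -1), (0, 1), (1, -1), (1, 0), (1, 1)]

-- A's inner helper count_adjacent_bombs (closes over grid, rows, cols)
def pvCountAdjacent (grid : List (List Bool)) (rows cols : Int) (r c : Int) : Int :=
  pvDirections.foldl
    (fun count d =>
      let nr := r + d.1
      let nc := c + d.2
      if 0 ≤ nr ∧ nr < rows ∧ 0 ≤ nc ∧ nc < cols ∧
          ((grid.getD nr.toNat []).getD nc.toNat false) = true
      then count + 1 else count) 0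

-- len(grid[0]) raises IndexError on an empty grid; Pre_ excludes [] so headD's default is never relevant
def detect_bombs (grid : List (List Bool)) : List (List Int) :=
  let rows := grid.length
  let cols := (grid.headD []).length
  (List.range rows).map (fun (r : Nat) =>
    (List.range cols).map (fun (c : Nat) => pvCountAdjacent grid (rows : Int) (cols : Int) (r : Int) (c : Int)))

-- ===== PORT B =====
def detect_bombs_alt (grid : List (List Bool)) : List (List Int) :=
  let rows := grid.length
  let cols := (grid.headD []).length   -- len(grid[0]); Pre_ excludes the empty grid
  let zero : List Int := List.replicate cols 0
  let intRows : List (List Int) := grid.map (fun row => (row.take cols).map (fun v => if v then (1 : Int) else 0))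
  (List.range rows).map (fun r =>
    let up := if 0 < r then intRows.getD (r - 1) zero else zero
    let mid := intRows.getD r zero
    let down := if r + 1 < rows then intRows.getD (r + 1) zero else zero
    let col := (List.range cols).map (fun c => up.getD c 0 + mid.getD c 0 + down.getD c 0)
    (List.range cols).map (fun c =>
      (if 0 < c then col.getD (c - 1) 0 else 0) + col.getD c 0 +
        (if c + 1 < cols then col.getD (c + 1) 0 else 0) - mid.getD c 0))

-- ===== PRECONDITION & SPEC =====
-- Pre_ excludes exactly the inputs on which A raises IndexError: the empty grid
-- (len(grid[0])) and grids with a row shorter than the first row (grid[nr][nc] out of range).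
def Pre_detect_bombs (grid : List (List Bool)) : Prop :=
  grid ≠ [] ∧ ∀ row ∈ grid, (grid.headD []).length ≤ row.length
instance (grid : List (List Bool)) : Decidable (Pre_detect_bombs grid) := by
  unfold Pre_detect_bombs; infer_instance

def pvWitness_detect_bombs : List (List Bool) :=
  [[true, false, false], [false, false, true], [false, true, false]]

def Spec_detect_bombs (grid : List (List Bool)) (out : List (List Int)) : Prop := out = detect_bombs_alt grid
instance (grid : List (List Bool)) (out : List (List Int)) : Decidable (Spec_detect_bombs grid out) := by unfold Spec_detect_bombs; infer_instance

-- ===== CLAIM (what is proved, stated in full; the proofs are below) =====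
def Claim_equal_detect_bombs : Prop := ∀ (grid : List (List Bool)), Dom_detect_bombs grid → Pre_detect_bombs grid → Spec_detect_bombs grid (detect_bombs grid)

-- ===== LEMMAS AND PROOFS =====

-- the zero-padded bomb indicator: 1 iff (i, j) is in bounds and holds a bomb
def pvB (grid : List (List Bool)) (rows cols : Int) (i j : Int) : Int :=
  if 0 ≤ i ∧ i < rows ∧ 0 ≤ j ∧ j < cols ∧ ((grid.getD i.toNat []).getD j.toNat false) = true
  then 1 else 0

theorem pv_if_add (cond : Prop) [Decidable cond] (a : Int) :
    (if cond then a + 1 else a) = a + (if cond then (1 : Int) else 0) := by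
  split_ifs <;> ring

-- A's per-cell scan is the sum of the eight padded indicators around (r, c)
theorem pvCountAdjacent_eq (grid : List (List Bool)) (rows cols : Int) (r c : Int) :
    pvCountAdjacent grid rows cols r c =
      pvB grid rows cols (r + -1) (c + -1) + pvB grid rows cols (r + -1) (c + 0) +
      pvB grid rows cols (r + -1) (c + 1) + pvB grid rows cols (r + 0) (c + -1) +
      pvB grid rows cols (r + 0) (c + 1) + pvB grid rows cols (r + 1) (c + -1) +
      pvB grid rows cols (r + 1) (c + 0) + pvB grid rows cols (r + 1) (c + 1) := by
  simp only [pvCountAdjacent, pvDirections, List.foldl_cons, List.foldl_nil, pv_if_add, pvB]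
  ring

theorem pvB_oob {grid : List (List Bool)} {rows cols : Int} {i j : Int}
    (h : ¬ (0 ≤ i ∧ i < rows ∧ 0 ≤ j ∧ j < cols)) : pvB grid rows cols i j = 0 := by
  simp only [pvB]
  split_ifs with h' <;> [exact absurd ⟨h'.1, h'.2.1, h'.2.2.1, h'.2.2.2.1⟩ h; rfl]

theorem pv_zero_getD (cols c : Nat) : (List.replicate cols (0 : Int)).getD c 0 = 0 := by
  rcases lt_or_ge c cols with h | h
  · rw [List.getD_eq_getElem _ _ (by rw [List.length_replicate]; exact h)]
    simp
  · rw [List.getD_eq_getElem?_getD, List.getElem?_eq_none (by rw [List.length_replicate]; exact h)]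
    rfl

-- looking up a converted row hits the padded indicator
theorem pv_introws_getD (grid : List (List Bool)) (cols : Nat)
    (hrows : ∀ row ∈ grid, cols ≤ row.length) (k c : Nat)
    (hk : k < grid.length) (hc : c < cols) :
    ((grid.map (fun row => (row.take cols).map (fun v => if v then (1 : Int) else 0))).getD k
        (List.replicate cols 0)).getD c 0 =
      pvB grid grid.length cols (k : Int) (c : Int) := by
  have hk' : k < (grid.map (fun row => (row.take cols).map (fun v => if v then (1 : Int) else 0))).length := by
    simpa using hk
  have hlen : cols ≤ (grid[k]'hk).length := hrows _ (List.getElem_mem hk)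
  have hc' : c < ((grid[k]'hk).take cols).length := by
    simpa [List.length_take] using lt_of_lt_of_le hc (le_min (le_refl cols) hlen)
  rw [List.getD_eq_getElem _ _ hk', List.getElem_map,
      List.getD_eq_getElem _ _ (by simpa [List.length_take] using hc'), List.getElem_map]
  have hb : ((grid[k]'hk).take cols)[c]'hc' = (grid[k]'hk)[c]'(lt_of_lt_of_le hc hlen) :=
    List.getElem_take
  rw [hb]
  simp only [pvB, Int.toNat_natCast]
  have e1 : grid.getD k [] = grid[k]'hk := List.getD_eq_getElem _ _ hk
  have hc2 : c < (grid[k]'hk).length := lt_of_lt_of_le hc hlen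
  have e2 : (grid[k]'hk).getD c false = (grid[k]'hk)[c]'hc2 := List.getD_eq_getElem _ _ hc2
  have h1 : (0 : Int) ≤ (k : Int) := Int.natCast_nonneg k
  have h2 : (k : Int) < (grid.length : Int) := by exact_mod_cast hk
  have h3 : (0 : Int) ≤ (c : Int) := Int.natCast_nonneg c
  have h4 : (c : Int) < (cols : Int) := by exact_mod_cast hc
  simp [h1, h2, h3, h4, List.getElem?_eq_getElem hk, List.getElem?_eq_getElem hc2]

-- per-cell agreement of the two ports
theorem pv_cell (grid : List (List Bool)) (cols : Nat)
    (hrows : ∀ row ∈ grid, cols ≤ row.length) (r c : Nat)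
    (hr : r < grid.length) (hc : c < cols) :
    pvCountAdjacent grid (grid.length : Int) (cols : Int) (r : Int) (c : Int) =
      (let zero : List Int := List.replicate cols 0
       let intRows : List (List Int) := grid.map (fun row => (row.take cols).map (fun v => if v then (1 : Int) else 0))
       let up := if 0 < r then intRows.getD (r - 1) zero else zero
       let mid := intRows.getD r zero
       let down := if r + 1 < grid.length then intRows.getD (r + 1) zero else zero
       let col := (List.range cols).map (fun c => up.getD c 0 + mid.getD c 0 + down.getD c 0)
       (if 0 < c then col.getD (c - 1) 0 else 0) + col.getD c 0 +
         (if c + 1 < cols then col.getD (c + 1) 0 else 0) - mid.getD c 0) := by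
  simp only []
  set zero : List Int := List.replicate cols 0 with hzero
  set intRows : List (List Int) := grid.map (fun row => (row.take cols).map (fun v => if v then (1 : Int) else 0)) with hintRows
  have hup : ∀ c' : Nat, c' < cols →
      (if 0 < r then intRows.getD (r - 1) zero else zero).getD c' 0 =
        pvB grid (grid.length : Int) (cols : Int) ((r : Int) + -1) (c' : Int) := by
    intro c' hc'
    by_cases h : 0 < r
    · rw [if_pos h, hintRows, hzero, pv_introws_getD grid cols hrows (r - 1) c' (by omega) hc']
      conv_lhs => rw [show (((r - 1 : Nat)) : Int) = (r : Int) + -1 by omega]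
    · rw [if_neg h, hzero, pv_zero_getD, pvB_oob (by omega)]
  have hmid : ∀ c' : Nat, c' < cols →
      (intRows.getD r zero).getD c' 0 =
        pvB grid (grid.length : Int) (cols : Int) ((r : Int) + 0) (c' : Int) := by
    intro c' hc'
    rw [hintRows, hzero, pv_introws_getD grid cols hrows r c' hr hc']
    conv_lhs => rw [show ((r : Nat) : Int) = (r : Int) + 0 by omega]
  have hdown : ∀ c' : Nat, c' < cols →
      (if r + 1 < grid.length then intRows.getD (r + 1) zero else zero).getD c' 0 =
        pvB grid (grid.length : Int) (cols : Int) ((r : Int) + 1) (c' : Int) := by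
    intro c' hc'
    by_cases h : r + 1 < grid.length
    · rw [if_pos h, hintRows, hzero, pv_introws_getD grid cols hrows (r + 1) c' h hc']
      conv_lhs => rw [show (((r + 1 : Nat)) : Int) = (r : Int) + 1 by omega]
    · rw [if_neg h, hzero, pv_zero_getD, pvB_oob (by omega)]
  have hcol : ∀ c' : Nat, c' < cols →
      ((List.range cols).map (fun c =>
          (if 0 < r then intRows.getD (r - 1) zero else zero).getD c 0 +
            (intRows.getD r zero).getD c 0 +
            (if r + 1 < grid.length then intRows.getD (r + 1) zero else zero).getD c 0)).getD c' 0 =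
        pvB grid (grid.length : Int) (cols : Int) ((r : Int) + -1) (c' : Int) +
          pvB grid (grid.length : Int) (cols : Int) ((r : Int) + 0) (c' : Int) +
          pvB grid (grid.length : Int) (cols : Int) ((r : Int) + 1) (c' : Int) := by
    intro c' hc'
    rw [List.getD_eq_getElem _ _ (by simpa using hc'), List.getElem_map, List.getElem_range,
        hup c' hc', hmid c' hc', hdown c' hc']
  rw [pvCountAdjacent_eq]
  rw [hcol c hc, hmid c hc]
  by_cases h0 : 0 < c
  · rw [if_pos h0, hcol (c - 1) (by omega)]
    conv_rhs => rw [show (((c - 1 : Nat)) : Int) = (c : Int) + -1 by omega]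
    by_cases h1 : c + 1 < cols
    · rw [if_pos h1, hcol (c + 1) h1]
      conv_rhs => rw [show (((c + 1 : Nat)) : Int) = (c : Int) + 1 by omega]
      ring_nf
    · rw [if_neg h1,
          pvB_oob (i := (r : Int) + -1) (j := (c : Int) + 1) (by omega),
          pvB_oob (i := (r : Int) + 0) (j := (c : Int) + 1) (by omega),
          pvB_oob (i := (r : Int) + 1) (j := (c : Int) + 1) (by omega)]
      ring_nf
  · rw [if_neg h0,
        pvB_oob (i := (r : Int) + -1) (j := (c : Int) + -1) (by omega),
        pvB_oob (i := (r : Int) + 0) (j := (c : Int) + -1) (by omega),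
        pvB_oob (i := (r : Int) + 1) (j := (c : Int) + -1) (by omega)]
    by_cases h1 : c + 1 < cols
    · rw [if_pos h1, hcol (c + 1) h1]
      conv_rhs => rw [show (((c + 1 : Nat)) : Int) = (c : Int) + 1 by omega]
      ring_nf
    · rw [if_neg h1,
          pvB_oob (i := (r : Int) + -1) (j := (c : Int) + 1) (by omega),
          pvB_oob (i := (r : Int) + 0) (j := (c : Int) + 1) (by omega),
          pvB_oob (i := (r : Int) + 1) (j := (c : Int) + 1) (by omega)]
      ring_nf

-- ===== VERDICT (by name: the statement is the Claim_ definition above) =====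
theorem detect_bombs_spec : Claim_equal_detect_bombs := by
  intro grid _ hpre
  obtain ⟨-, hrows⟩ := hpre
  unfold Spec_detect_bombs detect_bombs detect_bombs_alt
  simp only []
  refine List.map_congr_left ?_
  intro r hr
  rw [List.mem_range] at hr
  refine List.map_congr_left ?_
  intro c hc
  rw [List.mem_range] at hc
  exact pv_cell grid (grid.headD []).length hrows r c hr hc
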